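-- pv_equiv track=rewrite | github.com/David-Antolick/intron-retention-analysis | scr/analyze_coding_impact.py | find_stop_codon_distance
-- ===== SOURCE A (Python) =====
-- def find_first_stop_protein_index(protein_seq):
--     """
--     Find the index (in amino acids) of the first stop codon in protein_seq.
--     Returns None if no stop codon is found.
--     """
--     stop_pos = protein_seq.find("*")
--     if stop_pos == -1:
--         return None
--     return stop_pos
--
-- def find_stop_codon_distance(protein_seq, atg_index, ir_intron_end_index, gene_start, exons, strand):
--     """
--     Compute two distances (in amino acids) from the first stop codon:
--       1. Using the IR transcript:
--          The distance from the stop codon to the end of the retained intron.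
--          (Computed as: (ir_intron_end - (atg_index + stop_codon_nt_offset)) // 3)
--       2. Using canonical exon coordinates:
--          The distance from the stop codon (projected onto the gene) to the next exon junction.
--          (Computed by converting the next exon's absolute start (relative to gene_start) into protein coordinates.)
--
--     Parameters:
--       protein_seq: The translated protein sequence.
--       atg_index: Nucleotide offset in the IR transcript where translation starts.
--       ir_intron_end_index: Nucleotide index in the IR transcript where the intron ends.
--       gene_start: Absolute gene start (from the Desc field).
--       exons: List of exon dictionaries (with absolute 'start' values).
--       strand: Strand indicator.
--
--     Returns:
--       (distance_in_ir, distance_canonical) in amino acids relative to the first stop codon.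
--     """
--     first_stop = find_first_stop_protein_index(protein_seq)
--     if first_stop is None:
--         return None, None
--     # Compute the stop codon nucleotide position in the IR transcript.
--     stop_nt_pos = atg_index + first_stop * 3  # offset from beginning of IR transcript
--
--     # Distance in the IR transcript:
--     if ir_intron_end_index is not None:
--         dist_ir = (ir_intron_end_index - stop_nt_pos) // 3
--     else:
--         dist_ir = None
--
--     # Now compute canonical distance using exons (in absolute coordinates).
--     # We project the stop codon back to an approximate absolute position.
--     if strand in ("-", "-1", -1):
--         stop_abs = gene_start - (first_stop * 3)
--         sorted_exons = sorted(exons, key=lambda e: e["start"], reverse=True)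
--         next_exon = None
--         for exon in sorted_exons:
--             if exon["start"] < stop_abs:
--                 next_exon = exon
--                 break
--         if next_exon:
--             next_exon_rel = next_exon["start"] - gene_start
--             next_exon_prot = next_exon_rel // 3
--             canon_dist = next_exon_prot - first_stop
--         else:
--             canon_dist = None
--     else:
--         stop_abs = gene_start + (first_stop * 3)
--         sorted_exons = sorted(exons, key=lambda e: e["start"])
--         next_exon = None
--         for exon in sorted_exons:
--             if exon["start"] > stop_abs:
--                 next_exon = exon
--                 break
--         if next_exon:
--             next_exon_rel = next_exon["start"] - gene_start
--             next_exon_prot = next_exon_rel // 3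
--             canon_dist = next_exon_prot - first_stop
--         else:
--             canon_dist = None
--
--     return dist_ir, canon_dist
-- ===== SOURCE B (Python) =====
-- def find_stop_codon_distance(protein_seq, atg_index, ir_intron_end_index, gene_start, exons, strand):
--     first_stop = protein_seq.find("*")
--     if first_stop == -1:
--         return None, None
--     stop_nt_pos = atg_index + first_stop * 3
--     dist_ir = None if ir_intron_end_index is None else (ir_intron_end_index - stop_nt_pos) // 3
--     starts = [e["start"] for e in exons]
--     if strand in ("-", "-1", -1):
--         stop_abs = gene_start - first_stop * 3
--         # largest exon start strictly below the projected stop position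
--         best = max(filter(stop_abs.__gt__, starts), default=None)
--     else:
--         stop_abs = gene_start + first_stop * 3
--         # smallest exon start strictly above the projected stop position
--         best = min(filter(stop_abs.__lt__, starts), default=None)
--     canon = None if best is None else (best - gene_start) // 3 - first_stop
--     return dist_ir, canon
-- ===== Notes on version B (the rewrite author's own statement) =====
-- stated objective: alternative
-- what changed: B replaces A's sort of the exon list followed by a first-match scan with a single unsorted pass selecting the largest exon start below (resp. smallest above) the projected stop position, which is exactly the element A's sorted scan finds; asymptotically O(n) vs O(n log n) but not measurably faster in CPython since the sort runs in C.
-- outside the precondition, e.g. on find_stop_codon_distance('MA*Q', 2, 20, 100, [{}], '+'): A raises KeyError, B raises KeyError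
import Mathlib
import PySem

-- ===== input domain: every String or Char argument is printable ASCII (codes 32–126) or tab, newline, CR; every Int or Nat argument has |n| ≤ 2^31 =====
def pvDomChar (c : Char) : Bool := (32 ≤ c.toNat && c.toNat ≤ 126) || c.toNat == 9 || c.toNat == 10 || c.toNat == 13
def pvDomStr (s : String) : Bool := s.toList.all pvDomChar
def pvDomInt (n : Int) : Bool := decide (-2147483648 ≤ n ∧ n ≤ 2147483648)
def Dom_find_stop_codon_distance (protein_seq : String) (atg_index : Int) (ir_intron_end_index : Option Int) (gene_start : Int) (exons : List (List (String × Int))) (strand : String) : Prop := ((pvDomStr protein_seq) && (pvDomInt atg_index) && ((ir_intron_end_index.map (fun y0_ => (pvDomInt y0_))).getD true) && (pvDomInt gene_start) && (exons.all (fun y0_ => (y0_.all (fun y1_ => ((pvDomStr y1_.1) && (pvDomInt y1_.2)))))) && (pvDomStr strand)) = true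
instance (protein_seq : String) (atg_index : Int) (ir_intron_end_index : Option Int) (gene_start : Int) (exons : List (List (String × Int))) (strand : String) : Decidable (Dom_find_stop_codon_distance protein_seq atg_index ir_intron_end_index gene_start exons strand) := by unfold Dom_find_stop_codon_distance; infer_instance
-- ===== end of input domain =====

-- B replaces A's sort-then-scan over the exons by a single unsorted pass keeping the extremal
-- qualifying exon start (alternative algorithm, same measured cost); equivalence proved on all
-- inputs where A raises no KeyError (Pre_).

-- ===== PORT A =====

-- exon["start"] on the assoc-list dict: first match; 0 stands in for the KeyError case,
-- which Pre_ excludes wherever this accessor is reached.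
def exonStart (e : List (String × Int)) : Int := (e.lookup "start").getD 0

def find_first_stop_protein_index (protein_seq : String) : Option Int :=
  let stop_pos := PySem.Str.find protein_seq "*"
  if stop_pos = -1 then none else some stop_pos

-- A's 'for exon in sorted_exons: if <p on exon["start"]>: next_exon = exon; break'
def findNextExon (p : Int → Bool) : List (List (String × Int)) → Option (List (String × Int))
  | [] => none
  | e :: rest => if p (exonStart e) then some e else findNextExon p rest

def find_stop_codon_distance (protein_seq : String) (atg_index : Int) (ir_intron_end_index : Option Int) (gene_start : Int) (exons : List (List (String × Int))) (strand : String) : Option Int × Option Int :=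
  match find_first_stop_protein_index protein_seq with
  | none => (none, none)
  | some first_stop =>
    let stop_nt_pos := atg_index + first_stop * 3
    let dist_ir : Option Int :=
      match ir_intron_end_index with
      | some i => some (PySem.Int.floordiv (i - stop_nt_pos) 3)
      | none => none
    -- 'strand in ("-", "-1", -1)': here strand is typed String, so the int -1 member cannot match
    if strand = "-" ∨ strand = "-1" then
      let stop_abs := gene_start - first_stop * 3
      let sorted_exons := PySem.List.sorted exons exonStart true
      match findNextExon (fun s => decide (s < stop_abs)) sorted_exons with
      | some next_exon =>
        let next_exon_rel := exonStart next_exon - gene_start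
        let next_exon_prot := PySem.Int.floordiv next_exon_rel 3
        (dist_ir, some (next_exon_prot - first_stop))
      | none => (dist_ir, none)
    else
      let stop_abs := gene_start + first_stop * 3
      let sorted_exons := PySem.List.sorted exons exonStart false
      match findNextExon (fun s => decide (stop_abs < s)) sorted_exons with
      | some next_exon =>
        let next_exon_rel := exonStart next_exon - gene_start
        let next_exon_prot := PySem.Int.floordiv next_exon_rel 3
        (dist_ir, some (next_exon_prot - first_stop))
      | none => (dist_ir, none)

-- ===== PORT B =====

def find_stop_codon_distance_alt (protein_seq : String) (atg_index : Int) (ir_intron_end_index : Option Int) (gene_start : Int) (exons : List (List (String × Int))) (strand : String) : Option Int × Option Int :=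
  let first_stop := PySem.Str.find protein_seq "*"
  if first_stop = -1 then (none, none)
  else
    let stop_nt_pos := atg_index + first_stop * 3
    let dist_ir := ir_intron_end_index.map (fun i => PySem.Int.floordiv (i - stop_nt_pos) 3)
    let starts := exons.map exonStart
    let best : Option Int :=
      -- Source B's 'strand in ("-", "-1", -1)': the int -1 member cannot match a String strand
      if strand = "-" ∨ strand = "-1" then
        -- max(filter(stop_abs.__gt__, starts), default=None)
        PySem.List.max? (starts.filter (fun s => decide (s < gene_start - first_stop * 3))) (fun s => s)
      else
        -- min(filter(stop_abs.__lt__, starts), default=None)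
        PySem.List.min? (starts.filter (fun s => decide (gene_start + first_stop * 3 < s))) (fun s => s)
    (dist_ir, best.map (fun b => PySem.Int.floordiv (b - gene_start) 3 - first_stop))

-- ===== PRECONDITION & SPEC =====

-- Pre_ excludes exactly the inputs where A raises KeyError: a stop codon is present and
-- some exon dict lacks the "start" key (the exons are only touched once a stop is found).
def Pre_find_stop_codon_distance (protein_seq : String) (atg_index : Int) (ir_intron_end_index : Option Int) (gene_start : Int) (exons : List (List (String × Int))) (strand : String) : Prop :=
  PySem.Str.find protein_seq "*" = -1 ∨ ∀ e ∈ exons, (e.lookup "start").isSome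

instance (protein_seq : String) (atg_index : Int) (ir_intron_end_index : Option Int) (gene_start : Int) (exons : List (List (String × Int))) (strand : String) : Decidable (Pre_find_stop_codon_distance protein_seq atg_index ir_intron_end_index gene_start exons strand) := by unfold Pre_find_stop_codon_distance; infer_instance

def pvWitness_find_stop_codon_distance : String × Int × Option Int × Int × (List (List (String × Int))) × String :=
  ("MA*Q", 2, some 20, 100, [[("start", 112)], [("start", 95)]], "+")

def Spec_find_stop_codon_distance (protein_seq : String) (atg_index : Int) (ir_intron_end_index : Option Int) (gene_start : Int) (exons : List (List (String × Int))) (strand : String) (out : Option Int × Option Int) : Prop := out = find_stop_codon_distance_alt protein_seq atg_index ir_intron_end_index gene_start exons strand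
instance (protein_seq : String) (atg_index : Int) (ir_intron_end_index : Option Int) (gene_start : Int) (exons : List (List (String × Int))) (strand : String) (out : Option Int × Option Int) : Decidable (Spec_find_stop_codon_distance protein_seq atg_index ir_intron_end_index gene_start exons strand out) := by unfold Spec_find_stop_codon_distance; infer_instance

-- ===== CLAIM (what is proved, stated in full; the proofs are below) =====
def Claim_equal_find_stop_codon_distance : Prop := ∀ (protein_seq : String) (atg_index : Int) (ir_intron_end_index : Option Int) (gene_start : Int) (exons : List (List (String × Int))) (strand : String), Dom_find_stop_codon_distance protein_seq atg_index ir_intron_end_index gene_start exons strand → Pre_find_stop_codon_distance protein_seq atg_index ir_intron_end_index gene_start exons strand → Spec_find_stop_codon_distance protein_seq atg_index ir_intron_end_index gene_start exons strand (find_stop_codon_distance protein_seq atg_index ir_intron_end_index gene_start exons strand)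

-- ===== LEMMAS AND PROOFS =====

-- proof-only intermediate fold: keeps the largest start below v
def stepBelow (v : Int) (best : Option Int) (s : Int) : Option Int :=
  if decide (s < v) && best.all (fun m => decide (m < s)) then some s else best

-- proof-only intermediate fold: keeps the smallest start above v
def stepAbove (v : Int) (best : Option Int) (s : Int) : Option Int :=
  if decide (v < s) && best.all (fun m => decide (s < m)) then some s else best

theorem pvWitness_ok :
    Dom_find_stop_codon_distance (pvWitness_find_stop_codon_distance.1) (pvWitness_find_stop_codon_distance.2.1) (pvWitness_find_stop_codon_distance.2.2.1) (pvWitness_find_stop_codon_distance.2.2.2.1) (pvWitness_find_stop_codon_distance.2.2.2.2.1) (pvWitness_find_stop_codon_distance.2.2.2.2.2) ∧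
    Pre_find_stop_codon_distance (pvWitness_find_stop_codon_distance.1) (pvWitness_find_stop_codon_distance.2.1) (pvWitness_find_stop_codon_distance.2.2.1) (pvWitness_find_stop_codon_distance.2.2.2.1) (pvWitness_find_stop_codon_distance.2.2.2.2.1) (pvWitness_find_stop_codon_distance.2.2.2.2.2) := by
  decide

-- Once the fold holds a value no later, not-better element replaces it
theorem foldl_stepBelow_frozen (v m : Int) (ks : List Int) (h : ∀ s ∈ ks, ¬ m < s) :
    ks.foldl (stepBelow v) (some m) = some m := by
  induction ks with
  | nil => rfl
  | cons s t ih =>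
    have hs : ¬ m < s := h s (by simp)
    have ht : ∀ x ∈ t, ¬ m < x := fun x hx => h x (by simp [hx])
    simp [List.foldl_cons, stepBelow, hs, ih ht]

theorem foldl_stepAbove_frozen (v m : Int) (ks : List Int) (h : ∀ s ∈ ks, ¬ s < m) :
    ks.foldl (stepAbove v) (some m) = some m := by
  induction ks with
  | nil => rfl
  | cons s t ih =>
    have hs : ¬ s < m := h s (by simp)
    have ht : ∀ x ∈ t, ¬ x < m := fun x hx => h x (by simp [hx])
    simp [List.foldl_cons, stepAbove, hs, ih ht]

-- A's first-match scan over a key-descending list computes B's fold over its keys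
theorem findNext_desc (v : Int) (l : List (List (String × Int)))
    (hp : l.Pairwise (fun a b => exonStart b ≤ exonStart a)) :
    (findNextExon (fun s => decide (s < v)) l).map exonStart
      = (l.map exonStart).foldl (stepBelow v) none := by
  induction l with
  | nil => rfl
  | cons e t ih =>
    rw [List.pairwise_cons] at hp
    by_cases hv : exonStart e < v
    · have hge : ∀ s ∈ t.map exonStart, ¬ exonStart e < s := by
        intro s hs
        obtain ⟨y, hy, rfl⟩ := List.mem_map.mp hs
        exact not_lt.mpr (hp.1 y hy)
      simp [findNextExon, hv, stepBelow, foldl_stepBelow_frozen v _ _ hge]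
    · simp [findNextExon, hv, stepBelow, ih hp.2]

-- A's first-match scan over a key-ascending list computes B's fold over its keys
theorem findNext_asc (v : Int) (l : List (List (String × Int)))
    (hp : l.Pairwise (fun a b => exonStart a ≤ exonStart b)) :
    (findNextExon (fun s => decide (v < s)) l).map exonStart
      = (l.map exonStart).foldl (stepAbove v) none := by
  induction l with
  | nil => rfl
  | cons e t ih =>
    rw [List.pairwise_cons] at hp
    by_cases hv : v < exonStart e
    · have hge : ∀ s ∈ t.map exonStart, ¬ s < exonStart e := by
        intro s hs
        obtain ⟨y, hy, rfl⟩ := List.mem_map.mp hs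
        exact not_lt.mpr (hp.1 y hy)
      simp [findNextExon, hv, stepAbove, foldl_stepAbove_frozen v _ _ hge]
    · simp [findNextExon, hv, stepAbove, ih hp.2]

theorem stepBelow_rcomm (v : Int) : ∀ (b : Option Int) (x y : Int),
    stepBelow v (stepBelow v b x) y = stepBelow v (stepBelow v b y) x := by
  intro b x y
  cases b <;> simp [stepBelow] <;> split_ifs <;> simp_all <;> omega

theorem stepAbove_rcomm (v : Int) : ∀ (b : Option Int) (x y : Int),
    stepAbove v (stepAbove v b x) y = stepAbove v (stepAbove v b y) x := by
  intro b x y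
  cases b <;> simp [stepAbove] <;> split_ifs <;> simp_all <;> omega

-- non-qualifying elements leave the fold state untouched
theorem foldl_stepBelow_filter (v : Int) (ks : List Int) : ∀ b,
    ks.foldl (stepBelow v) b = (ks.filter (fun s => decide (s < v))).foldl (stepBelow v) b := by
  induction ks with
  | nil => intro b; rfl
  | cons s t ih =>
    intro b
    by_cases hs : s < v
    · simp only [List.foldl_cons, List.filter_cons, hs, decide_true, if_true]
      exact ih _
    · have hstep : stepBelow v b s = b := by simp [stepBelow, hs]
      simp only [List.foldl_cons, List.filter_cons, hs, decide_false, hstep]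
      exact ih b

theorem foldl_stepAbove_filter (v : Int) (ks : List Int) : ∀ b,
    ks.foldl (stepAbove v) b = (ks.filter (fun s => decide (v < s))).foldl (stepAbove v) b := by
  induction ks with
  | nil => intro b; rfl
  | cons s t ih =>
    intro b
    by_cases hs : v < s
    · simp only [List.foldl_cons, List.filter_cons, hs, decide_true, if_true]
      exact ih _
    · have hstep : stepAbove v b s = b := by simp [stepAbove, hs]
      simp only [List.foldl_cons, List.filter_cons, hs, decide_false, hstep]
      exact ih b

-- on all-qualifying keys the fold is the running max / min
theorem foldl_stepBelow_run_max (v : Int) (t : List Int) : ∀ x, (∀ s ∈ t, s < v) →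
    t.foldl (stepBelow v) (some x) = some (t.foldl max x) := by
  induction t with
  | nil => intro x _; rfl
  | cons s t ih =>
    intro x h
    have hs : s < v := h s (by simp)
    have ht : ∀ y ∈ t, y < v := fun y hy => h y (by simp [hy])
    have hstep : stepBelow v (some x) s = some (max x s) := by
      by_cases hxs : x < s
      · simp [stepBelow, hs, hxs, max_eq_right (le_of_lt hxs)]
      · simp [stepBelow, hs, hxs, max_eq_left (not_lt.mp hxs)]
    simp only [List.foldl_cons, hstep, ih _ ht]

theorem foldl_stepAbove_run_min (v : Int) (t : List Int) : ∀ x, (∀ s ∈ t, v < s) →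
    t.foldl (stepAbove v) (some x) = some (t.foldl min x) := by
  induction t with
  | nil => intro x _; rfl
  | cons s t ih =>
    intro x h
    have hs : v < s := h s (by simp)
    have ht : ∀ y ∈ t, v < y := fun y hy => h y (by simp [hy])
    have hstep : stepAbove v (some x) s = some (min x s) := by
      by_cases hxs : s < x
      · simp [stepAbove, hs, hxs, min_eq_right (le_of_lt hxs)]
      · simp [stepAbove, hs, hxs, min_eq_left (not_lt.mp hxs)]
    simp only [List.foldl_cons, hstep, ih _ ht]

theorem foldl_stepBelow_eq_max? (v : Int) (ks : List Int) :
    ks.foldl (stepBelow v) none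
      = PySem.List.max? (ks.filter (fun s => decide (s < v))) (fun s => s) := by
  rw [foldl_stepBelow_filter]
  cases hc : ks.filter (fun s => decide (s < v)) with
  | nil => rfl
  | cons x t =>
    have hmem : ∀ s ∈ x :: t, s < v := by
      intro s hs
      have : s ∈ ks.filter (fun s => decide (s < v)) := hc ▸ hs
      simpa using (List.mem_filter.mp this).2
    have hx : x < v := hmem x (by simp)
    have hstep : stepBelow v none x = some x := by simp [stepBelow, hx]
    rw [PySem.List.max?_id_cons, List.foldl_cons, hstep,
      foldl_stepBelow_run_max v t x (fun s hs => hmem s (by simp [hs]))]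

theorem foldl_stepAbove_eq_min? (v : Int) (ks : List Int) :
    ks.foldl (stepAbove v) none
      = PySem.List.min? (ks.filter (fun s => decide (v < s))) (fun s => s) := by
  rw [foldl_stepAbove_filter]
  cases hc : ks.filter (fun s => decide (v < s)) with
  | nil => rfl
  | cons x t =>
    have hmem : ∀ s ∈ x :: t, v < s := by
      intro s hs
      have : s ∈ ks.filter (fun s => decide (v < s)) := hc ▸ hs
      simpa using (List.mem_filter.mp this).2
    have hx : v < x := hmem x (by simp)
    have hstep : stepAbove v none x = some x := by simp [stepAbove, hx]
    rw [PySem.List.min?_id_cons, List.foldl_cons, hstep,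
      foldl_stepAbove_run_min v t x (fun s hs => hmem s (by simp [hs]))]

-- ===== VERDICT (by name: the statement is the Claim_ definition above) =====
theorem find_stop_codon_distance_spec : Claim_equal_find_stop_codon_distance := by
  unfold Claim_equal_find_stop_codon_distance
  intro protein_seq atg_index ir_intron_end_index gene_start exons strand _ _
  unfold Spec_find_stop_codon_distance
  unfold find_stop_codon_distance find_stop_codon_distance_alt find_first_stop_protein_index
  by_cases hf : PySem.Str.find protein_seq "*" = -1
  · rw [if_pos hf, if_pos hf]
  · rw [if_neg hf, if_neg hf]
    by_cases hstr : strand = "-" ∨ strand = "-1"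
    · simp only [hstr, if_true]
      have hperm : ((PySem.List.sorted exons exonStart true).map exonStart).Perm
          (exons.map exonStart) := (PySem.List.sorted_perm exons exonStart true).map exonStart
      have hkey : (findNextExon (fun s => decide (s < gene_start - (PySem.Str.find protein_seq "*") * 3))
            (PySem.List.sorted exons exonStart true)).map exonStart
          = PySem.List.max? ((exons.map exonStart).filter
              (fun s => decide (s < gene_start - (PySem.Str.find protein_seq "*") * 3))) (fun s => s) := by
        rw [findNext_desc (gene_start - (PySem.Str.find protein_seq "*") * 3) (PySem.List.sorted exons exonStart true)
          (PySem.List.sorted_pairwise_rev exons exonStart),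
          List.Perm.foldl_eq (rcomm := ⟨fun b x y => stepBelow_rcomm _ b x y⟩) hperm none,
          foldl_stepBelow_eq_max?]
      cases hfind : findNextExon (fun s => decide (s < gene_start - (PySem.Str.find protein_seq "*") * 3))
          (PySem.List.sorted exons exonStart true) with
      | none =>
        rw [hfind] at hkey
        simp only [Option.map_none] at hkey
        rw [← hkey]
        cases ir_intron_end_index <;> simp
      | some e =>
        rw [hfind] at hkey
        simp only [Option.map_some] at hkey
        rw [← hkey]
        cases ir_intron_end_index <;> simp
    · simp only [hstr, if_false]
      have hperm : ((PySem.List.sorted exons exonStart false).map exonStart).Perm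
          (exons.map exonStart) := (PySem.List.sorted_perm exons exonStart false).map exonStart
      have hkey : (findNextExon (fun s => decide (gene_start + (PySem.Str.find protein_seq "*") * 3 < s))
            (PySem.List.sorted exons exonStart false)).map exonStart
          = PySem.List.min? ((exons.map exonStart).filter
              (fun s => decide (gene_start + (PySem.Str.find protein_seq "*") * 3 < s))) (fun s => s) := by
        rw [findNext_asc (gene_start + (PySem.Str.find protein_seq "*") * 3) (PySem.List.sorted exons exonStart false)
          (PySem.List.sorted_pairwise exons exonStart),
          List.Perm.foldl_eq (rcomm := ⟨fun b x y => stepAbove_rcomm _ b x y⟩) hperm none,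
          foldl_stepAbove_eq_min?]
      cases hfind : findNextExon (fun s => decide (gene_start + (PySem.Str.find protein_seq "*") * 3 < s))
          (PySem.List.sorted exons exonStart false) with
      | none =>
        rw [hfind] at hkey
        simp only [Option.map_none] at hkey
        rw [← hkey]
        cases ir_intron_end_index <;> simp
      | some e =>
        rw [hfind] at hkey
        simp only [Option.map_some] at hkey
        rw [← hkey]
        cases ir_intron_end_index <;> simp
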